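-- pv_equiv track=rewrite | github.com/pypi-data/pypi-mirror-42 | packages/squid-py/squid-py-0.4.4.tar.gz/squid-py-0.4.4/squid_py/agreements/service_agreement_template.py | compress_dep_timeout_values
-- ===== SOURCE A (Python) =====
-- def compress_dep_timeout_values(dependency_list, timeout_flags_list):
--     compressed_dep_value = 0
--     num_bits = 2  # 1st for dependency, 2nd for timeout flag
--     for i, d in enumerate(dependency_list):
--         t = timeout_flags_list[i]
--         offset = i * num_bits
--         compressed_dep_value |= d * 2 ** (offset + 0)  # the dependency bit
--         compressed_dep_value |= t * 2 ** (offset + 1)  # the timeout bit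
--
--     return compressed_dep_value
-- ===== SOURCE B (Python) =====
-- def compress_dep_timeout_values(dependency_list, timeout_flags_list):
--     # Horner-style: traverse indices from high to low, keeping a running
--     # accumulator shifted past two bit-slots per step (no positional 2**offset).
--     result = 0
--     for i in range(len(dependency_list) - 1, -1, -1):
--         result = result * 4 | dependency_list[i] | timeout_flags_list[i] * 2
--     return result
-- ===== Notes on version B (the rewrite author's own statement) =====
-- stated objective: faster
-- what changed: Replaces the enumerate loop that ORs each pair into place with a freshly built positional weight 2**(2*i) by a Horner-style backwards loop keeping one running accumulator (result = result*4 | d | t*2), so no large power is ever constructed.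
import Mathlib
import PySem

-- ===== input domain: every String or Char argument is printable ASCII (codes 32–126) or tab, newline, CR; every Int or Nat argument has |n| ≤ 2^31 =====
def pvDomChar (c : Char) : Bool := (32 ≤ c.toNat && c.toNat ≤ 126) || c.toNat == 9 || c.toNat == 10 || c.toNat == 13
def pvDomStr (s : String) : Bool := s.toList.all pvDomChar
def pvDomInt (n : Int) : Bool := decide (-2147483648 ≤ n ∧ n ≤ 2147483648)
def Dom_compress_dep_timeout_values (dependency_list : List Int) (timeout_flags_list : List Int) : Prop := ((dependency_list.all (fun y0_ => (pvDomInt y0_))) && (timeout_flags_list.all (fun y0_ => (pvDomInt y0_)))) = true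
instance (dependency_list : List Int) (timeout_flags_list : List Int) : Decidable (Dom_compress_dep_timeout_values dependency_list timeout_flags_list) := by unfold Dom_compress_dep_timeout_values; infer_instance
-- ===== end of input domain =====

-- B packs the same flag bits with a Horner-style backwards loop (one running accumulator,
-- ×4 per step) instead of A's enumerate loop that rebuilds the positional weight 2**(2*i)
-- each iteration; measured faster in a timing run, equal wherever A returns (Pre_).

-- ===== PORT A =====
-- literal transliteration of A: for i, d in enumerate(dependency_list): t = timeout[i];
-- offset = i*2; value |= d * 2**(offset+0); value |= t * 2**(offset+1).
-- (pyGetD's default is never reached under Pre_; the exponent's .toNat is exact since i ≥ 0)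
def compress_dep_timeout_values (dependency_list : List Int) (timeout_flags_list : List Int) : Int :=
  (PySem.List.enumerate dependency_list 0).foldl
    (fun compressed_dep_value p =>
      PySem.Int.bor
        (PySem.Int.bor compressed_dep_value (p.2 * 2 ^ (p.1 * 2 + 0).toNat))
        (PySem.List.pyGetD timeout_flags_list p.1 0 * 2 ^ (p.1 * 2 + 1).toNat))
    0

-- ===== PORT B =====
-- literal transliteration of Source B: for i in range(len(dl)-1, -1, -1):
--   result = result * 4 | dl[i] | tl[i] * 2
def compress_dep_timeout_values_alt (dependency_list : List Int) (timeout_flags_list : List Int) : Int :=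
  (PySem.List.pyRange ((dependency_list.length : Int) - 1) (-1) (-1)).foldl
    (fun result i =>
      PySem.Int.bor
        (PySem.Int.bor (result * 4) (PySem.List.pyGetD dependency_list i 0))
        (PySem.List.pyGetD timeout_flags_list i 0 * 2))
    0

-- ===== PRECONDITION & SPEC =====
-- Pre_ excludes exactly the inputs where Python A raises IndexError
-- (timeout_flags_list shorter than dependency_list); B raises there too.
def Pre_compress_dep_timeout_values (dependency_list : List Int) (timeout_flags_list : List Int) : Prop :=
  dependency_list.length ≤ timeout_flags_list.length
instance (dependency_list : List Int) (timeout_flags_list : List Int) : Decidable (Pre_compress_dep_timeout_values dependency_list timeout_flags_list) := by unfold Pre_compress_dep_timeout_values; infer_instance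
def pvWitness_compress_dep_timeout_values : List Int × List Int := ([1, 0, 1], [0, 1, 1])

def Spec_compress_dep_timeout_values (dependency_list : List Int) (timeout_flags_list : List Int) (out : Int) : Prop := out = compress_dep_timeout_values_alt dependency_list timeout_flags_list
instance (dependency_list : List Int) (timeout_flags_list : List Int) (out : Int) : Decidable (Spec_compress_dep_timeout_values dependency_list timeout_flags_list out) := by unfold Spec_compress_dep_timeout_values; infer_instance

-- ===== CLAIM (what is proved, stated in full; the proofs are below) =====
def Claim_equal_compress_dep_timeout_values : Prop := ∀ (dependency_list : List Int) (timeout_flags_list : List Int), Dom_compress_dep_timeout_values dependency_list timeout_flags_list → Pre_compress_dep_timeout_values dependency_list timeout_flags_list → Spec_compress_dep_timeout_values dependency_list timeout_flags_list (compress_dep_timeout_values dependency_list timeout_flags_list)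

-- ===== LEMMAS AND PROOFS =====

-- Nat groundwork: the bits of n&&&m and of ldiff n m partition the bits of n.
theorem pvLandAddLdiff : ∀ n m : Nat, (n &&& m) + Nat.ldiff n m = n := by
  intro n
  induction n using Nat.binaryRec with
  | zero =>
    intro m
    have h : Nat.ldiff 0 m = 0 :=
      Nat.eq_of_testBit_eq (by intro k; simp [Nat.testBit_ldiff])
    simp [h]
  | bit bn n' ih =>
    intro m
    cases m using Nat.bitCasesOn with
    | bit bm m' =>
      rw [Nat.land_bit, Nat.ldiff_bit]
      rw [Nat.bit_val, Nat.bit_val, Nat.bit_val]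
      have hb : (bn && bm).toNat + (bn && !bm).toNat = bn.toNat := by
        cases bn <;> cases bm <;> rfl
      have := ih m'
      omega

theorem pvSubLand (n m : Nat) : n - (n &&& m) = Nat.ldiff n m := by
  have h := pvLandAddLdiff n m
  omega

-- PySem's Python-exact `|` agrees with Mathlib's Int.lor.
theorem pvBorEqLor (a b : Int) : PySem.Int.bor a b = Int.lor a b := by
  cases a with
  | ofNat m =>
    cases b with
    | ofNat n =>
      simp [PySem.Int.bor, Int.lor]
    | negSucc n =>
      have hb : ¬ (0 : Int) ≤ Int.negSucc n := by rw [Int.negSucc_eq]; omega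
      have ht : (-(Int.negSucc n) - 1).toNat = n := by rw [Int.negSucc_eq]; omega
      simp only [PySem.Int.bor, hb, if_false]
      rw [show -Int.negSucc n - 1 = -(Int.negSucc n) - 1 by ring, ht]
      simp [Int.lor, pvSubLand, Int.negSucc_eq]
      omega
  | negSucc m =>
    have ha : ¬ (0 : Int) ≤ Int.negSucc m := by rw [Int.negSucc_eq]; omega
    have hta : (-(Int.negSucc m) - 1).toNat = m := by rw [Int.negSucc_eq]; omega
    cases b with
    | ofNat n =>
      simp only [PySem.Int.bor, ha, if_false]
      rw [show -Int.negSucc m - 1 = -(Int.negSucc m) - 1 by ring, hta]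
      simp [Int.lor, pvSubLand, Int.negSucc_eq]
      omega
    | negSucc n =>
      have hb : ¬ (0 : Int) ≤ Int.negSucc n := by rw [Int.negSucc_eq]; omega
      have htb : (-(Int.negSucc n) - 1).toNat = n := by rw [Int.negSucc_eq]; omega
      simp only [PySem.Int.bor, ha, hb, if_false]
      rw [show -Int.negSucc m - 1 = -(Int.negSucc m) - 1 by ring, hta,
          show -Int.negSucc n - 1 = -(Int.negSucc n) - 1 by ring, htb]
      simp [Int.lor, Int.negSucc_eq]
      omega

-- extensionality of Int by bits
theorem pvIntExt (a b : Int) (h : ∀ k, a.testBit k = b.testBit k) : a = b := by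
  cases a with
  | ofNat m =>
    cases b with
    | ofNat n =>
      have : m = n := Nat.eq_of_testBit_eq (fun k => h k)
      simp [this]
    | negSucc n =>
      exfalso
      have hm : m.testBit (m + n) = false :=
        Nat.testBit_lt_two_pow (lt_of_lt_of_le Nat.lt_two_pow_self
          (Nat.pow_le_pow_right (by norm_num) (Nat.le_add_right _ _)))
      have hn : n.testBit (m + n) = false :=
        Nat.testBit_lt_two_pow (lt_of_lt_of_le Nat.lt_two_pow_self
          (Nat.pow_le_pow_right (by norm_num) (Nat.le_add_left _ _)))
      have := h (m + n)
      simp [Int.testBit, hm, hn] at this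
  | negSucc m =>
    cases b with
    | ofNat n =>
      exfalso
      have hm : m.testBit (m + n) = false :=
        Nat.testBit_lt_two_pow (lt_of_lt_of_le Nat.lt_two_pow_self
          (Nat.pow_le_pow_right (by norm_num) (Nat.le_add_right _ _)))
      have hn : n.testBit (m + n) = false :=
        Nat.testBit_lt_two_pow (lt_of_lt_of_le Nat.lt_two_pow_self
          (Nat.pow_le_pow_right (by norm_num) (Nat.le_add_left _ _)))
      have := h (m + n)
      simp [Int.testBit, hm, hn] at this
    | negSucc n =>
      have : m = n := Nat.eq_of_testBit_eq (by
        intro k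
        have := h k
        simpa [Int.testBit] using this)
      simp [this]

theorem pvZeroBor (a : Int) : PySem.Int.bor 0 a = a := by
  rw [PySem.Int.bor_comm, PySem.Int.bor_zero]

-- bits of a doubled integer
theorem pvTbMulTwoZero (a : Int) : (a * 2).testBit 0 = false := by
  cases a with
  | ofNat m =>
    have h : (Int.ofNat m) * 2 = Int.ofNat (Nat.bit false m) := by
      rw [Nat.bit_false_apply, Int.ofNat_eq_natCast, Int.ofNat_eq_natCast]; push_cast; ring
    rw [h]
    simp only [Int.testBit]
    rw [Nat.testBit_bit_zero]
  | negSucc m =>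
    have h : (Int.negSucc m) * 2 = Int.negSucc (Nat.bit true m) := by
      rw [Nat.bit_true_apply, Int.negSucc_eq, Int.negSucc_eq]; push_cast; ring
    rw [h]
    simp only [Int.testBit]
    rw [Nat.testBit_bit_zero]
    rfl

theorem pvTbMulTwoSucc (a : Int) (k : Nat) : (a * 2).testBit (k + 1) = a.testBit k := by
  cases a with
  | ofNat m =>
    have h : (Int.ofNat m) * 2 = Int.ofNat (Nat.bit false m) := by
      rw [Nat.bit_false_apply, Int.ofNat_eq_natCast, Int.ofNat_eq_natCast]; push_cast; ring
    rw [h]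
    simp only [Int.testBit]
    rw [Nat.testBit_bit_succ]
  | negSucc m =>
    have h : (Int.negSucc m) * 2 = Int.negSucc (Nat.bit true m) := by
      rw [Nat.bit_true_apply, Int.negSucc_eq, Int.negSucc_eq]; push_cast; ring
    rw [h]
    simp only [Int.testBit]
    rw [Nat.testBit_bit_succ]

theorem pvLorMulTwo (a b : Int) : Int.lor a b * 2 = Int.lor (a * 2) (b * 2) := by
  apply pvIntExt
  intro k
  cases k with
  | zero => simp [pvTbMulTwoZero, Int.testBit_lor]
  | succ k => simp [pvTbMulTwoSucc, Int.testBit_lor]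

theorem pvLorMulPow (a b : Int) (n : Nat) :
    Int.lor a b * 2 ^ n = Int.lor (a * 2 ^ n) (b * 2 ^ n) := by
  induction n with
  | zero => simp
  | succ n ih =>
    have h2 : ∀ x : Int, x * 2 ^ (n + 1) = x * 2 ^ n * 2 := by intro x; ring
    rw [h2, h2, h2, ih, pvLorMulTwo]

theorem pvBorMulPow (a b : Int) (n : Nat) :
    PySem.Int.bor a b * 2 ^ n = PySem.Int.bor (a * 2 ^ n) (b * 2 ^ n) := by
  simp only [pvBorEqLor]; exact pvLorMulPow a b n

theorem pvBorRearrange (a x y z : Int) :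
    PySem.Int.bor (PySem.Int.bor (PySem.Int.bor a x) y) z
      = PySem.Int.bor a (PySem.Int.bor (PySem.Int.bor z x) y) := by
  simp only [pvBorEqLor]
  apply pvIntExt
  intro k
  simp only [Int.testBit_lor]
  cases a.testBit k <;> cases x.testBit k <;> cases y.testBit k <;> cases z.testBit k <;> rfl

-- the common reference: Horner recursion packing flag pairs front-first
def pvHorner : List Int → List Int → Int
  | [], _ => 0
  | d :: ds, ts =>
      PySem.Int.bor
        (PySem.Int.bor (pvHorner ds ts.tail * 4) d)
        (ts.headD 0 * 2)

theorem pvGetDHeadD (tl : List Int) : tl.getD 0 0 = tl.headD 0 := by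
  cases tl <;> rfl

theorem pvHeadDDrop (tl : List Int) (k : Nat) : (tl.drop k).headD 0 = tl.getD k 0 := by
  induction k generalizing tl with
  | zero => rw [List.drop_zero, pvGetDHeadD]
  | succ k ih =>
    cases tl with
    | nil => simp
    | cons t ts => simp

theorem pvGetDTail (tl : List Int) (k : Nat) : tl.getD (k + 1) 0 = tl.tail.getD k 0 := by
  cases tl <;> simp [List.getD]

-- ===== A-side: the enumerate/positional-weight fold computes pvHorner =====
theorem pvFoldA (tl : List Int) : ∀ (ds : List Int) (k : Nat) (acc : Int),
    (PySem.List.enumerate ds (k : Int)).foldl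
      (fun compressed_dep_value p =>
        PySem.Int.bor
          (PySem.Int.bor compressed_dep_value (p.2 * 2 ^ (p.1 * 2 + 0).toNat))
          (PySem.List.pyGetD tl p.1 0 * 2 ^ (p.1 * 2 + 1).toNat))
      acc
    = PySem.Int.bor acc (pvHorner ds (tl.drop k) * 2 ^ (2 * k)) := by
  intro ds
  induction ds with
  | nil =>
    intro k acc
    simp [PySem.List.enumerate_nil, pvHorner, PySem.Int.bor_zero]
  | cons d ds ih =>
    intro k acc
    rw [PySem.List.enumerate_cons, List.foldl_cons,
        show ((k : Int) + 1) = ((k + 1 : Nat) : Int) by push_cast; ring,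
        ih (k + 1)]
    have e1 : ((k : Int) * 2 + 0).toNat = 2 * k := by omega
    have e2 : ((k : Int) * 2 + 1).toNat = 2 * k + 1 := by omega
    simp only [e1, e2, PySem.List.pyGetD_natCast]
    rw [show pvHorner (d :: ds) (tl.drop k)
          = PySem.Int.bor
              (PySem.Int.bor (pvHorner ds (tl.drop (k + 1)) * 4) d)
              (tl.getD k 0 * 2) by
        rw [pvHorner, List.tail_drop, pvHeadDDrop]]
    rw [pvBorMulPow, pvBorMulPow]
    rw [show pvHorner ds (tl.drop (k + 1)) * 4 * 2 ^ (2 * k)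
          = pvHorner ds (tl.drop (k + 1)) * 2 ^ (2 * (k + 1)) by ring]
    rw [show tl.getD k 0 * 2 * 2 ^ (2 * k) = tl.getD k 0 * 2 ^ (2 * k + 1) by ring]
    exact pvBorRearrange acc (d * 2 ^ (2 * k)) (tl.getD k 0 * 2 ^ (2 * k + 1))
      (pvHorner ds (tl.drop (k + 1)) * 2 ^ (2 * (k + 1)))

theorem pvAEqHorner (dl tl : List Int) :
    compress_dep_timeout_values dl tl = pvHorner dl tl := by
  unfold compress_dep_timeout_values
  have h := pvFoldA tl dl 0 0
  rw [Nat.cast_zero] at h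
  rw [h]
  simp [pvZeroBor]

-- ===== B-side: the backwards range loop computes pvHorner =====
theorem pvFoldB : ∀ (dl tl : List Int),
    (List.range dl.length).foldr
      (fun k r =>
        PySem.Int.bor (PySem.Int.bor (r * 4) (dl.getD k 0)) (tl.getD k 0 * 2))
      0
    = pvHorner dl tl := by
  intro dl
  induction dl with
  | nil => intro tl; simp [pvHorner]
  | cons d ds ih =>
    intro tl
    rw [List.length_cons, List.range_succ_eq_map, List.foldr_cons, List.foldr_map]
    have hfun :
        (fun (k : Nat) (r : Int) =>
          PySem.Int.bor (PySem.Int.bor (r * 4) ((d :: ds).getD (Nat.succ k) 0))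
            (tl.getD (Nat.succ k) 0 * 2))
        = (fun (k : Nat) (r : Int) =>
          PySem.Int.bor (PySem.Int.bor (r * 4) (ds.getD k 0)) (tl.tail.getD k 0 * 2)) := by
      funext k r
      rw [show Nat.succ k = k + 1 from rfl, List.getD_cons_succ, pvGetDTail]
    rw [hfun, ih tl.tail]
    rw [List.getD_cons_zero, pvGetDHeadD]
    rw [pvHorner]

theorem pvBEqHorner (dl tl : List Int) :
    compress_dep_timeout_values_alt dl tl = pvHorner dl tl := by
  unfold compress_dep_timeout_values_alt
  rw [PySem.List.pyRange_neg_one_eq_reverse]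
  rw [show ((-1 : Int) + 1) = 0 by norm_num,
      show ((dl.length : Int) - 1 + 1) = (dl.length : Int) by ring]
  rw [PySem.List.pyRange_zero_natCast, List.foldl_reverse, List.foldr_map]
  simp only [PySem.List.pyGetD_natCast]
  exact pvFoldB dl tl

-- ===== VERDICT (by name: the statement is the Claim_ definition above) =====
theorem compress_dep_timeout_values_spec : Claim_equal_compress_dep_timeout_values := by
  intro dl tl _ _
  unfold Spec_compress_dep_timeout_values
  rw [pvAEqHorner, pvBEqHorner]
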